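-- pv_equiv track=rewrite | github.com/TheEgid/social_networks_smm_analyzer | fb_analyze.py | collect_reactions
-- ===== SOURCE A (Python) =====
-- def collect_reactions(reactions):
--     types_reactions = {"LIKE": 0, "LOVE": 0, "WOW": 0, "HAHA": 0, "SAD": 0,
--                        "ANGRY": 0}
--     for type, _ in types_reactions.items():
--         for reaction in reactions:
--             if reaction == type:
--                 types_reactions[type] = types_reactions.get(type) + 1
--     return types_reactions
-- ===== SOURCE B (Python) =====
-- def collect_reactions(reactions):
--     types_reactions = {"LIKE": 0, "LOVE": 0, "WOW": 0, "HAHA": 0, "SAD": 0,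
--                        "ANGRY": 0}
--     for reaction in reactions:
--         if reaction in types_reactions:
--             types_reactions[reaction] += 1
--     return types_reactions
-- ===== Notes on version B (the rewrite author's own statement) =====
-- stated objective: simpler
-- what changed: Replaces the per-type rescans of the whole reactions list (one full pass per each of the six types) with a single membership-guarded counting pass, keeping the six-key dict and its key order unchanged.
import Mathlib
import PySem

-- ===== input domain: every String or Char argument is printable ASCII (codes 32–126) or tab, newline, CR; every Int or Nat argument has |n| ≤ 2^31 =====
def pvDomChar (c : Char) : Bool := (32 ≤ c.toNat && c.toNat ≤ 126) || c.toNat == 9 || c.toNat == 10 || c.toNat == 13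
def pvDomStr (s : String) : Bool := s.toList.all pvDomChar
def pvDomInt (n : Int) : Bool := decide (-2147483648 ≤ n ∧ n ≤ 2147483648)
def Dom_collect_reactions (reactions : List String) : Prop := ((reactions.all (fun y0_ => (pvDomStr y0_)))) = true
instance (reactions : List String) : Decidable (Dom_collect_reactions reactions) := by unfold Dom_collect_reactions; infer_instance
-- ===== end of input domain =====

-- B replaces A's six full passes over `reactions` (one per reaction type) by a single
-- membership-guarded counting pass over `reactions`; same six-key dict, same key order.

-- ===== PORT A =====
-- inner loop of A: `for reaction in reactions: if reaction == type: types_reactions[type] = types_reactions.get(type) + 1`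
-- (`.get(type)` is ported as `(d.get? t).getD 0`: exact here since `type` is always a key of the dict)
def cr_innerA (reactions : List String) (t : String) (d : PySem.Dict String Int) : PySem.Dict String Int :=
  reactions.foldl (fun d r => if r == t then d.insert t ((d.get? t).getD 0 + 1) else d) d

def collect_reactions (reactions : List String) : List (String × Int) :=
  let types_reactions : PySem.Dict String Int :=
    PySem.Dict.ofList [("LIKE", 0), ("LOVE", 0), ("WOW", 0), ("HAHA", 0), ("SAD", 0), ("ANGRY", 0)]
  (types_reactions.items.foldl (fun d p => cr_innerA reactions p.1 d) types_reactions).items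

-- ===== PORT B =====
def collect_reactions_alt (reactions : List String) : List (String × Int) :=
  let types_reactions : PySem.Dict String Int :=
    PySem.Dict.ofList [("LIKE", 0), ("LOVE", 0), ("WOW", 0), ("HAHA", 0), ("SAD", 0), ("ANGRY", 0)]
  (reactions.foldl (fun d r => if d.contains r then d.modify r 0 (· + 1) else d) types_reactions).items

-- ===== PRECONDITION & SPEC =====
def Spec_collect_reactions (reactions : List String) (out : List (String × Int)) : Prop := out = collect_reactions_alt reactions
instance (reactions : List String) (out : List (String × Int)) : Decidable (Spec_collect_reactions reactions out) := by unfold Spec_collect_reactions; infer_instance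

-- ===== CLAIM (what is proved, stated in full; the proofs are below) =====
def Claim_equal_collect_reactions : Prop := ∀ (reactions : List String), Dom_collect_reactions reactions → Spec_collect_reactions reactions (collect_reactions reactions)

-- ===== LEMMAS AND PROOFS =====

def cr_d0 : PySem.Dict String Int :=
  PySem.Dict.ofList [("LIKE", 0), ("LOVE", 0), ("WOW", 0), ("HAHA", 0), ("SAD", 0), ("ANGRY", 0)]

def cr_types : List String := ["LIKE", "LOVE", "WOW", "HAHA", "SAD", "ANGRY"]

theorem cr_innerA_cons (r : String) (l : List String) (t : String) (d : PySem.Dict String Int) :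
    cr_innerA (r :: l) t d
      = cr_innerA l t (if r == t then d.insert t ((d.get? t).getD 0 + 1) else d) := rfl

theorem innerA_keys (l : List String) (t : String) (d : PySem.Dict String Int)
    (h : d.contains t = true) : (cr_innerA l t d).keys = d.keys := by
  induction l generalizing d with
  | nil => rfl
  | cons r l ih =>
    rw [cr_innerA_cons]
    by_cases hr : (r == t) = true
    · rw [if_pos hr, ih _ (PySem.Dict.contains_insert_self d t _),
          PySem.Dict.keys_insert_of_contains d _ h]
    · rw [if_neg hr]; exact ih d h

theorem innerA_getD_self (l : List String) (t : String) (d : PySem.Dict String Int) :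
    (cr_innerA l t d).getD t 0 = d.getD t 0 + l.count t := by
  induction l generalizing d with
  | nil => simp [cr_innerA]
  | cons r l ih =>
    rw [cr_innerA_cons]
    by_cases hr : (r == t) = true
    · rw [if_pos hr, ih, PySem.Dict.getD_insert_self, PySem.Dict.getD_eq_get?_getD]
      simp [List.count_cons, hr]; ring
    · rw [if_neg hr, ih]
      simp [List.count_cons, hr]

theorem innerA_getD_ne (l : List String) (t k : String) (d : PySem.Dict String Int)
    (h : k ≠ t) : (cr_innerA l t d).getD k 0 = d.getD k 0 := by
  induction l generalizing d with
  | nil => rfl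
  | cons r l ih =>
    rw [cr_innerA_cons]
    by_cases hr : (r == t) = true
    · rw [if_pos hr, ih, PySem.Dict.getD_insert_of_ne _ _ _ h]
    · rw [if_neg hr]; exact ih d

theorem outerA_keys (ts : List String) (r : List String) (d : PySem.Dict String Int)
    (h : ∀ t ∈ ts, d.contains t = true) :
    (ts.foldl (fun d t => cr_innerA r t d) d).keys = d.keys := by
  induction ts generalizing d with
  | nil => rfl
  | cons t ts ih =>
    simp only [List.foldl_cons]
    have hk := innerA_keys r t d (h t (List.mem_cons_self))
    rw [ih _ (fun t' ht' => by
      rw [PySem.Dict.contains_eq_decide_mem_keys, hk, ← PySem.Dict.contains_eq_decide_mem_keys]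
      exact h t' (List.mem_cons_of_mem _ ht')), hk]

theorem outerA_getD (ts : List String) (r : List String) (d : PySem.Dict String Int) (k : String) :
    (ts.foldl (fun d t => cr_innerA r t d) d).getD k 0
      = d.getD k 0 + (ts.count k : Int) * r.count k := by
  induction ts generalizing d with
  | nil => simp
  | cons t ts ih =>
    simp only [List.foldl_cons]
    rw [ih]
    by_cases hk : k = t
    · subst hk
      rw [innerA_getD_self]
      simp; ring
    · rw [innerA_getD_ne _ _ _ _ hk]
      have : ¬ (t == k) = true := by simpa using Ne.symm hk
      simp [List.count_cons, this]

theorem altB_keys (l : List String) (d : PySem.Dict String Int) :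
    (l.foldl (fun d r => if d.contains r then d.modify r 0 (· + 1) else d) d).keys = d.keys := by
  induction l generalizing d with
  | nil => rfl
  | cons r l ih =>
    simp only [List.foldl_cons]
    by_cases hr : d.contains r = true
    · rw [if_pos hr, ih, PySem.Dict.keys_modify]
      exact PySem.Dict.keys_insert_of_contains d _ hr
    · rw [if_neg hr]; exact ih d

theorem altB_getD (l : List String) (d : PySem.Dict String Int) (k : String)
    (hk : d.contains k = true) :
    (l.foldl (fun d r => if d.contains r then d.modify r 0 (· + 1) else d) d).getD k 0
      = d.getD k 0 + l.count k := by
  induction l generalizing d with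
  | nil => simp
  | cons r l ih =>
    simp only [List.foldl_cons]
    by_cases hr : d.contains r = true
    · rw [if_pos hr]
      have hck : (d.modify r 0 (· + 1)).contains k = true := by
        rw [PySem.Dict.contains_modify]; simp [hk]
      by_cases hkr : k = r
      · subst hkr
        rw [ih _ hck, PySem.Dict.getD_modify_self]
        simp; ring
      · rw [ih _ hck, PySem.Dict.getD_modify_of_ne _ _ _ hkr]
        have : ¬ (r == k) = true := by simpa using Ne.symm hkr
        simp [List.count_cons, this]
    · rw [if_neg hr]
      have hkr : k ≠ r := fun he => by rw [he] at hk; exact absurd hk (by simp [hr])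
      have : ¬ (r == k) = true := by simpa using Ne.symm hkr
      rw [ih d hk]
      simp [List.count_cons, this]

-- ===== VERDICT (by name: the statement is the Claim_ definition above) =====
theorem collect_reactions_spec : Claim_equal_collect_reactions := by
  intro reactions _
  show collect_reactions reactions = collect_reactions_alt reactions
  have hA' : collect_reactions reactions
      = (cr_types.foldl (fun d t => cr_innerA reactions t d) cr_d0).items := rfl
  have hB' : collect_reactions_alt reactions
      = (reactions.foldl (fun d r => if d.contains r then d.modify r 0 (· + 1) else d) cr_d0).items := rfl
  rw [hA', hB']
  have hcont : ∀ t ∈ cr_types, cr_d0.contains t = true := by decide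
  have hkA : (cr_types.foldl (fun d t => cr_innerA reactions t d) cr_d0).keys = cr_types := by
    rw [outerA_keys _ _ _ hcont]; decide
  have hkB : (reactions.foldl (fun d r => if d.contains r then d.modify r 0 (· + 1) else d) cr_d0).keys
      = cr_types := by rw [altB_keys]; decide
  have hndA : (cr_types.foldl (fun d t => cr_innerA reactions t d) cr_d0).keys.Nodup := by
    rw [hkA]; decide
  have hndB : (reactions.foldl (fun d r => if d.contains r then d.modify r 0 (· + 1) else d) cr_d0).keys.Nodup := by
    rw [hkB]; decide
  rw [PySem.Dict.items_eq_map_keys _ hndA 0, PySem.Dict.items_eq_map_keys _ hndB 0, hkA, hkB]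
  apply List.map_congr_left
  intro k hk
  have hcontk : cr_d0.contains k = true := hcont k hk
  have hc1 : ((cr_types.count k : Nat) : Int) = 1 := by fin_cases hk <;> decide
  have hg0 : cr_d0.getD k 0 = 0 := by fin_cases hk <;> decide
  rw [Prod.ext_iff]
  refine ⟨rfl, ?_⟩
  rw [outerA_getD, altB_getD _ _ _ hcontk, hg0, hc1]
  ring
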